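-- pv_equiv track=rewrite | github.com/SpicyLemon/SpicyLemon | advent_of_code/2022/day-24b/day-24b.py | grid_str_with_edges
-- ===== SOURCE A (Python) =====
-- def get_dimensions(grid):
--     rv = Point(0, len(grid))
--     for y in range(0, rv.y):
--         if len(grid[y]) > rv.x:
--             rv.x = len(grid[y])
--     return rv
--
-- def grid_str_with_edges(grid) -> str:
--     dims = get_dimensions(grid)
--     height = dims.y
--     width = dims.x
--     for y in range(0, height):
--         if len(grid[y]) > width:
--             width = len(grid[y])
--     header_lines = grid_header_lines(width)
--     lines = []
--     lines.extend(header_lines)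
--     for y in range(0, height):
--         new_line = ''.join(grid[y]) + (' ' * (width - len(grid[y])))
--         lines.append(f'{y:>3}{new_line}{y}')
--     lines.extend(reversed(header_lines))
--     return '\n'.join(lines)
--
-- def grid_header_lines(width):
--     lines = []
--     if width > 100:
--         lines.append(' ' * 100)
--         for i in range(1, 10):
--             lines[-1] += str(i) * 100
--             if len(lines[-1]) >= width:
--                 lines[-1] = lines[-1][:width]
--                 break
--     if width > 10:
--         lines.append(' ' * 10)
--         skip_zero = True
--         while True:
--             for i in range(0,10):
--                 if skip_zero and i == 0:
--                     skip_zero = False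
--                     continue
--                 lines[-1] += str(i) * 10
--             if len(lines[-1]) >= width:
--                 lines[-1] = lines[-1][:width]
--                 break
--     lines.append('')
--     while True:
--         for i in range(0, 10):
--             lines[-1] += str(i)
--         if len(lines[-1]) >= width:
--             lines[-1] = lines[-1][:width]
--             break
--     lead = ' ' * 3
--     for i in range(0, len(lines)):
--         lines[i] = lead + lines[i]
--     return lines
--
-- class Point(object):
--     '''A Point is a thing with an x and y value.'''
--     def __init__(self, x=0, y=0, z=None):
--         '''Constructor for a Point that optionally accepts the x and y values.'''
--         self.x = x
--         self.y = y
--         self.z = z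
--     def __str__(self) -> str:
--         '''Get a string representation of this Point.'''
--         if self.z != None:
--             return f'({self.x},{self.y},{self.z})'
--         return f'({self.x},{self.y})'
--     def distance_to(self, p2) -> int:
--         '''Calculates the Manhattan distance between this point and another.'''
--         return distance(self, p2)
-- ===== SOURCE B (Python) =====
-- def grid_str_with_edges(grid) -> str:
--     width = max((len(row) for row in grid), default=0)
--     header = []
--     if width > 100:
--         # the hundreds ruler carries one digit per column, so it labels columns 0..999 only
--         header.append('   ' + ''.join(' ' if c < 100 else str((c // 100) % 10)
--                                       for c in range(min(width, 1000))))
--     if width > 10: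
--         header.append('   ' + ''.join(' ' if c < 10 else str((c // 10) % 10)
--                                       for c in range(width)))
--     header.append('   ' + ''.join(str(c % 10) for c in range(width)))
--     body = [f'{y:>3}{"".join(row)}{" " * (width - len(row))}{y}'
--             for y, row in enumerate(grid)]
--     return '\n'.join(header + body + header[::-1])
-- ===== Notes on version B (the rewrite author's own statement) =====
-- stated objective: simpler
-- what changed: Builds each ruler line with a per-column digit formula (' ' or (c//10^k)%10 over range(width)) instead of appending repeated-digit blocks in while/for loops and slicing, and computes the width and the body rows in one comprehension pass instead of get_dimensions plus a second re-scan loop.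
import Mathlib
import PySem

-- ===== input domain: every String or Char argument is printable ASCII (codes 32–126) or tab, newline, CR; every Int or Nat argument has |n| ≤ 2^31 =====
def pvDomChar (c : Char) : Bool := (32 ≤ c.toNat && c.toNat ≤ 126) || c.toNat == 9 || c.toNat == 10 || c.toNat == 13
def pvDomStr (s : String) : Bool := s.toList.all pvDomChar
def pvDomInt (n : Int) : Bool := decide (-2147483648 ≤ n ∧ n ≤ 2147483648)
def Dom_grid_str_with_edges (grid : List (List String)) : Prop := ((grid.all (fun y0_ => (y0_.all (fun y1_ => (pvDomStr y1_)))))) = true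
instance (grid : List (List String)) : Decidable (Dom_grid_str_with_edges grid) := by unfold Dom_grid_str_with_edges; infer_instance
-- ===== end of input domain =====

-- B builds each ruler line by a per-column digit formula over range(width) (join of one comprehension)
-- instead of A's block-append-then-slice while/for loops, and computes width + body rows in one pass;
-- objective: simpler, same asymptotic cost.


-- ===== PORT A =====
-- str(i)*k blocks use Nat.digitChar (exact for 0 ≤ i ≤ 9, the only values reached)
def pvDigitsA : List Char := ['0', '1', '2', '3', '4', '5', '6', '7', '8', '9']

-- the units 'while True: append 0..9; if len >= width: truncate; break' loop
def pvAUnitsLoop (width : Nat) (acc : List Char) : List Char :=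
  if width ≤ (acc ++ pvDigitsA).length then (acc ++ pvDigitsA).take width
  else pvAUnitsLoop width (acc ++ pvDigitsA)
termination_by width - acc.length
decreasing_by simp [pvDigitsA] at *; omega

-- one pass of the tens loop body: 'for i in range(0,10): if skip_zero and i == 0: …; else append str(i)*10'
def pvATensPass (st : Bool × List Char) : Bool × List Char :=
  (List.range 10).foldl
    (fun st i => if st.1 && (i == 0) then (false, st.2)
                 else (st.1, st.2 ++ List.replicate 10 (Nat.digitChar i))) st

-- termination fact for the tens while-loop (each pass appends at least 90 chars)
theorem pvATensPass_len (st : Bool × List Char) :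
    st.2.length + 90 ≤ (pvATensPass st).2.length := by
  obtain ⟨b, l⟩ := st
  cases b <;> simp [pvATensPass, show List.range 10 = [0,1,2,3,4,5,6,7,8,9] from rfl]

def pvATensLoop (width : Nat) (st : Bool × List Char) : List Char :=
  if width ≤ (pvATensPass st).2.length then (pvATensPass st).2.take width
  else pvATensLoop width (pvATensPass st)
termination_by width - st.2.length
decreasing_by have := pvATensPass_len st; omega

-- the hundreds 'for i in range(1,10): append str(i)*100; if len >= width: truncate; break' loop
def pvAHundLoop (width : Nat) : List Nat → List Char → List Char
  | [], acc => acc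
  | i :: rest, acc =>
    if width ≤ (acc ++ List.replicate 100 (Nat.digitChar i)).length then
      (acc ++ List.replicate 100 (Nat.digitChar i)).take width
    else pvAHundLoop width rest (acc ++ List.replicate 100 (Nat.digitChar i))

def pvAHeaderLines (width : Nat) : List (List Char) :=
  let l1 : List (List Char) :=
    if 100 < width then [pvAHundLoop width (List.range' 1 9) (List.replicate 100 ' ')] else []
  let l2 := if 10 < width then l1 ++ [pvATensLoop width (true, List.replicate 10 ' ')] else l1
  let l3 := l2 ++ [pvAUnitsLoop width []]
  l3.map (fun l => ' ' :: ' ' :: ' ' :: l)  -- 'lines[i] = lead + lines[i]'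

-- f'{y:>3}{new_line}{y}' with new_line = ''.join(row) + ' '*(width-len(row)); shared by both ports
def pvRowStr (row : List String) (width : Nat) (y : Int) : List Char :=
  let ys := (PySem.Int.toStr y).toList
  (List.replicate (3 - ys.length) ' ' ++ ys)
    ++ ((row.map String.toList).flatten ++ List.replicate (width - row.length) ' ') ++ ys

def grid_str_with_edges (grid : List (List String)) : String :=
  let height : Int := (grid.length : Int)   -- dims.y
  let width0 : Nat :=                        -- get_dimensions: rv.x
    (PySem.List.pyRange 0 (grid.length : Int) 1).foldl
      (fun x y => if x < (PySem.List.pyGetD grid y []).length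
                  then (PySem.List.pyGetD grid y []).length else x) 0
  let width : Nat :=                         -- the re-scan loop in grid_str_with_edges
    (PySem.List.pyRange 0 height 1).foldl
      (fun x y => if x < (PySem.List.pyGetD grid y []).length
                  then (PySem.List.pyGetD grid y []).length else x) width0
  let header := pvAHeaderLines width
  let lines :=
    (PySem.List.pyRange 0 height 1).foldl
      (fun ls y => ls ++ [pvRowStr (PySem.List.pyGetD grid y []) width y]) header
  String.ofList (List.intercalate ['\n'] (lines ++ header.reverse))

-- ===== PORT B =====
def pvBHundChar (c : Nat) : Char := if c < 100 then ' ' else Nat.digitChar ((c / 100) % 10)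
def pvBTensChar (c : Nat) : Char := if c < 10 then ' ' else Nat.digitChar ((c / 10) % 10)
def pvBUnitChar (c : Nat) : Char := Nat.digitChar (c % 10)

def pvBHeader (width : Nat) : List (List Char) :=
  (if 100 < width then
      [' ' :: ' ' :: ' ' :: ((List.range (min width 1000)).map pvBHundChar)] else [])
    ++ (if 10 < width then
      [' ' :: ' ' :: ' ' :: ((List.range width).map pvBTensChar)] else [])
    ++ [' ' :: ' ' :: ' ' :: ((List.range width).map pvBUnitChar)]

def grid_str_with_edges_alt (grid : List (List String)) : String :=
  let width : Nat := grid.foldl (fun w r => Nat.max w r.length) 0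
  let header := pvBHeader width
  let body := (PySem.List.enumerate grid 0).map (fun p => pvRowStr p.2 width p.1)
  String.ofList (List.intercalate ['\n'] (header ++ body ++ header.reverse))

-- ===== PRECONDITION & SPEC =====
def Spec_grid_str_with_edges (grid : List (List String)) (out : String) : Prop := out = grid_str_with_edges_alt grid
instance (grid : List (List String)) (out : String) : Decidable (Spec_grid_str_with_edges grid out) := by unfold Spec_grid_str_with_edges; infer_instance

-- ===== CLAIM (what is proved, stated in full; the proofs are below) =====
def Claim_equal_grid_str_with_edges : Prop := ∀ (grid : List (List String)), Dom_grid_str_with_edges grid → Spec_grid_str_with_edges grid (grid_str_with_edges grid)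

-- ===== LEMMAS AND PROOFS =====

-- generic: appending a constant block to a prefix of the column-map
theorem pv_block (f : Nat → Char) (n B : Nat) (d : Char) (h : ∀ j < B, f (n + j) = d) :
    (List.range n).map f ++ List.replicate B d = (List.range (n + B)).map f := by
  rw [List.range_add, List.map_append, List.map_map]
  congr 1
  symm
  rw [List.eq_replicate_iff]
  refine ⟨by simp, ?_⟩
  intro b hb
  simp only [List.mem_map, List.mem_range, Function.comp] at hb
  obtain ⟨j, hj, rfl⟩ := hb
  exact h j hj

theorem pv_units_block (n : Nat) (h : n % 10 = 0) :
    (List.range n).map pvBUnitChar ++ pvDigitsA = (List.range (n + 10)).map pvBUnitChar := by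
  rw [List.range_add, List.map_append, List.map_map]
  congr 1
  have : ∀ j ∈ List.range 10, (pvBUnitChar ∘ (n + ·)) j = Nat.digitChar j := by
    intro j hj
    simp only [List.mem_range] at hj
    simp only [Function.comp, pvBUnitChar]
    congr 1
    omega
  rw [List.map_congr_left this]
  decide

theorem pv_units_loop (w : Nat) : ∀ k n, w ≤ n + 10 * k → n % 10 = 0 →
    pvAUnitsLoop w ((List.range n).map pvBUnitChar) = (List.range w).map pvBUnitChar := by
  intro k
  induction k with
  | zero =>
    intro n hw hn
    rw [pvAUnitsLoop, pv_units_block n hn, if_pos (by simp; omega),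
      ← List.map_take, List.take_range, Nat.min_eq_left (by omega)]
  | succ k ih =>
    intro n hw hn
    rw [pvAUnitsLoop, pv_units_block n hn]
    by_cases hc : w ≤ ((List.range (n + 10)).map pvBUnitChar).length
    · simp only [List.length_map, List.length_range] at hc
      rw [if_pos (by simp; omega), ← List.map_take, List.take_range, Nat.min_eq_left (by omega)]
    · rw [if_neg hc]
      exact ih (n + 10) (by omega) (by omega)

theorem pv_units_top (w : Nat) : pvAUnitsLoop w [] = (List.range w).map pvBUnitChar := by
  have := pv_units_loop w w 0 (by omega) (by omega)
  simpa using this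


theorem pv_pass_false (l : List Char) :
    pvATensPass (false, l) =
      (false, (List.range 10).foldl (fun acc i => acc ++ List.replicate 10 (Nat.digitChar i)) l) := by
  simp [pvATensPass, show List.range 10 = [0,1,2,3,4,5,6,7,8,9] from rfl]

theorem pv_tens_pass_fold (n : Nat) (h10 : 10 ≤ n) (h100 : n % 100 = 0) :
    ∀ m, m ≤ 10 →
    (List.range m).foldl (fun acc i => acc ++ List.replicate 10 (Nat.digitChar i))
        ((List.range n).map pvBTensChar)
      = (List.range (n + 10 * m)).map pvBTensChar := by
  intro m
  induction m with
  | zero => simp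
  | succ m ih =>
    intro hm
    rw [List.range_succ, List.foldl_append, ih (by omega)]
    simp only [List.foldl_cons, List.foldl_nil]
    have : n + 10 * (m + 1) = (n + 10 * m) + 10 := by omega
    rw [this]
    apply pv_block
    intro j hj
    simp only [pvBTensChar]
    rw [if_neg (by omega)]
    congr 1
    omega

theorem pv_tens_P1 : pvATensPass (true, List.replicate 10 ' ')
    = (false, (List.range 100).map pvBTensChar) := by decide

theorem pv_tens_P2 (n : Nat) (h10 : 10 ≤ n) (h100 : n % 100 = 0) :
    pvATensPass (false, (List.range n).map pvBTensChar)
      = (false, (List.range (n + 100)).map pvBTensChar) := by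
  rw [pv_pass_false, pv_tens_pass_fold n h10 h100 10 (by omega)]

theorem pv_tens_loop (w : Nat) : ∀ k n, 10 ≤ n → n % 100 = 0 → w ≤ n + 100 * k →
    pvATensLoop w (false, (List.range n).map pvBTensChar) = (List.range w).map pvBTensChar := by
  intro k
  induction k with
  | zero =>
    intro n h10 h100 hw
    rw [pvATensLoop, pv_tens_P2 n h10 h100, if_pos (by simp; omega),
      ← List.map_take, List.take_range, Nat.min_eq_left (by omega)]
  | succ k ih =>
    intro n h10 h100 hw
    rw [pvATensLoop, pv_tens_P2 n h10 h100]
    by_cases hc : w ≤ n + 100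
    · rw [if_pos (by simp; omega), ← List.map_take, List.take_range, Nat.min_eq_left (by omega)]
    · rw [if_neg (by simp; omega)]
      exact ih (n + 100) (by omega) (by omega) (by omega)

theorem pv_tens_top (w : Nat) :
    pvATensLoop w (true, List.replicate 10 ' ') = (List.range w).map pvBTensChar := by
  rw [pvATensLoop, pv_tens_P1]
  by_cases hc : w ≤ 100
  · rw [if_pos (by simp; omega), ← List.map_take, List.take_range, Nat.min_eq_left (by omega)]
  · rw [if_neg (by simp; omega)]
    exact pv_tens_loop w w 100 (by omega) (by omega) (by omega)

theorem pv_hund_loop (w : Nat) : ∀ m i, i + m = 10 → 1 ≤ i → (i = 1 ∨ 100 * i < w) →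
    pvAHundLoop w (List.range' i m) ((List.range (100 * i)).map pvBHundChar)
      = (List.range (min w 1000)).map pvBHundChar := by
  intro m
  induction m with
  | zero =>
    intro i h1 h2 h3
    have hi : i = 10 := by omega
    subst hi
    have hw : 1000 < w := by omega
    simp only [List.range'_zero, pvAHundLoop]
    rw [Nat.min_eq_right (by omega)]
  | succ m ih =>
    intro i h1 h2 h3
    rw [List.range'_succ]
    simp only [pvAHundLoop]
    have hblock : (List.range (100 * i)).map pvBHundChar ++ List.replicate 100 (Nat.digitChar i)
        = (List.range (100 * (i + 1))).map pvBHundChar := by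
      have : 100 * (i + 1) = 100 * i + 100 := by omega
      rw [this]
      apply pv_block
      intro j hj
      simp only [pvBHundChar]
      rw [if_neg (by omega)]
      congr 1
      omega
    rw [hblock]
    by_cases hc : w ≤ 100 * (i + 1)
    · rw [if_pos (by simp; omega), ← List.map_take, List.take_range,
        Nat.min_eq_left (by omega), Nat.min_eq_left (by omega)]
    · rw [if_neg (by simp; omega)]
      exact ih (i + 1) (by omega) (by omega) (Or.inr (by omega))

theorem pv_hund_top (w : Nat) :
    pvAHundLoop w (List.range' 1 9) (List.replicate 100 ' ')
      = (List.range (min w 1000)).map pvBHundChar := by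
  have h0 : List.replicate 100 ' ' = (List.range (100 * 1)).map pvBHundChar := by decide
  rw [h0]
  exact pv_hund_loop w 9 1 (by omega) (by omega) (Or.inl rfl)

theorem pv_header_eq (w : Nat) : pvAHeaderLines w = pvBHeader w := by
  simp only [pvAHeaderLines, pvBHeader, pv_units_top, pv_tens_top, pv_hund_top]
  split_ifs <;> simp

theorem pv_fold_max (l : List (List String)) : ∀ s : Nat,
    l.foldl (fun x r => if x < r.length then r.length else x) s
      = l.foldl (fun w r => Nat.max w r.length) s := by
  induction l with
  | nil => intro s; rfl
  | cons a t ih =>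
    intro s
    simp only [List.foldl_cons]
    rw [show (if s < a.length then a.length else s) = Nat.max s a.length by simp only [Nat.max_def]; split_ifs <;> omega]
    exact ih _

theorem pv_max_hoist (l : List (List String)) : ∀ s,
    l.foldl (fun w r => Nat.max w r.length) s
      = Nat.max s (l.foldl (fun w r => Nat.max w r.length) 0) := by
  induction l with
  | nil => intro s; simp
  | cons a t ih =>
    intro s
    simp only [List.foldl_cons]
    rw [ih (Nat.max s a.length), ih (Nat.max 0 a.length)]
    simp [Nat.max_assoc]

theorem pv_width_eq (grid : List (List String)) :
    ((PySem.List.pyRange 0 (grid.length : Int) 1).foldl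
      (fun x y => if x < (PySem.List.pyGetD grid y []).length
                  then (PySem.List.pyGetD grid y []).length else x)
      ((PySem.List.pyRange 0 (grid.length : Int) 1).foldl
        (fun x y => if x < (PySem.List.pyGetD grid y []).length
                    then (PySem.List.pyGetD grid y []).length else x) 0))
      = grid.foldl (fun w r => Nat.max w r.length) 0 := by
  rw [PySem.List.foldl_pyRange_zero_pyGetD' grid []
        (fun x r => if x < r.length then r.length else x),
      PySem.List.foldl_pyRange_zero_pyGetD' grid []
        (fun x r => if x < r.length then r.length else x),
      pv_fold_max, pv_fold_max, pv_max_hoist]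
  exact Nat.max_self _

theorem pv_body_eq (grid : List (List String)) (w : Nat) (init : List (List Char)) :
    (PySem.List.pyRange 0 (grid.length : Int) 1).foldl
      (fun ls y => ls ++ [pvRowStr (PySem.List.pyGetD grid y []) w y]) init
      = init ++ (PySem.List.enumerate grid 0).map (fun p => pvRowStr p.2 w p.1) := by
  rw [PySem.List.foldl_append_singleton_eq_map
        (fun y => pvRowStr (PySem.List.pyGetD grid y []) w y),
      PySem.List.enumerate_eq_map_pyRange grid [], List.map_map]
  rfl

-- ===== VERDICT (by name: the statement is the Claim_ definition above) =====
theorem grid_str_with_edges_spec : Claim_equal_grid_str_with_edges := by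
  intro grid _
  unfold Spec_grid_str_with_edges grid_str_with_edges grid_str_with_edges_alt
  simp only [pv_width_eq, pv_header_eq, pv_body_eq]
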